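-- pv_equiv track=rewrite | github.com/cvanelteren/PlexSim | plexsim/utils/graph.py | erase_path
-- ===== SOURCE A (Python) =====
-- def erase_path(path: list, target: int) -> list:
--     # keep path until target
--     new_path = []
--     for node in path:
--         if node == target:
--             return new_path
--         else:
--             new_path.append(node)
--     return new_path
-- ===== SOURCE B (Python) =====
-- def erase_path(path: list, target: int) -> list:
--     # find-then-slice: locate the first occurrence and slice before it
--     if target in path:
--         return path[:path.index(target)]
--     return path[:]
-- ===== Notes on version B (the rewrite author's own statement) =====
-- stated objective: idiomatic
-- what changed: Replaces the element-by-element accumulating loop with a membership test plus list.index and a single slice (find-then-slice decomposition).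
import Mathlib
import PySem

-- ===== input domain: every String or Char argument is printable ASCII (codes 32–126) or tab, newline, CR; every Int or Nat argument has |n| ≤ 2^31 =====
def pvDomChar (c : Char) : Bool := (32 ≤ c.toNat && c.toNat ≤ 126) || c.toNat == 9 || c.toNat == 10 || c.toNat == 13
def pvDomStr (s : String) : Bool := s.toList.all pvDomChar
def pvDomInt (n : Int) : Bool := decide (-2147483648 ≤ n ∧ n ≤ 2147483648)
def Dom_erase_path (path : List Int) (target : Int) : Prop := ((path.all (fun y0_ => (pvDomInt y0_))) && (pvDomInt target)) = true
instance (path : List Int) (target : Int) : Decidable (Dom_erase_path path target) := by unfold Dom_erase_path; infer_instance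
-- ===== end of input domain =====

-- B replaces A's accumulating loop with a membership test, list.index and one slice (idiomatic find-then-slice).

-- ===== PORT A =====
-- the Python for-loop with early return, as structural recursion over the path with the accumulator new_path
def erase_path.go (target : Int) (new_path : List Int) : List Int → List Int
  | [] => new_path
  | node :: rest => if node == target then new_path else erase_path.go target (new_path ++ [node]) rest

def erase_path (path : List Int) (target : Int) : List Int :=
  erase_path.go target [] path

-- ===== PORT B =====
def erase_path_alt (path : List Int) (target : Int) : List Int :=
  if path.contains target then
    match PySem.List.index? path target with
    | some i => PySem.List.slice path none (some (i : Int))   -- path[:path.index(target)]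
    | none => []   -- unreachable: target ∈ path
  else path       -- path[:] (fresh copy; same value)

-- ===== PRECONDITION & SPEC =====
def Spec_erase_path (path : List Int) (target : Int) (out : List Int) : Prop := out = erase_path_alt path target
instance (path : List Int) (target : Int) (out : List Int) : Decidable (Spec_erase_path path target out) := by unfold Spec_erase_path; infer_instance

-- ===== CLAIM (what is proved, stated in full; the proofs are below) =====
def Claim_equal_erase_path : Prop := ∀ (path : List Int) (target : Int), Dom_erase_path path target → Spec_erase_path path target (erase_path path target)

-- ===== LEMMAS AND PROOFS =====
theorem erase_path_go_acc (target : Int) (l : List Int) (acc : List Int) :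
    erase_path.go target acc l = acc ++ erase_path.go target [] l := by
  induction l generalizing acc with
  | nil => simp [erase_path.go]
  | cons x rest ih =>
    by_cases hx : x == target
    · simp [erase_path.go, hx]
    · simp only [erase_path.go, hx, if_neg, Bool.false_eq_true, not_false_iff]
      rw [ih (acc ++ [x]), ih ([] ++ [x])]
      simp

theorem erase_path_eq_alt (path : List Int) (target : Int) :
    erase_path path target = erase_path_alt path target := by
  induction path with
  | nil => simp [erase_path, erase_path.go, erase_path_alt]
  | cons x rest ih =>
    by_cases hx : x = target
    · subst hx
      simp [erase_path, erase_path.go, erase_path_alt, List.idxOf?_cons]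
      simpa using PySem.List.slice_to_natCast (x :: rest) 0
    · have hne : (x == target) = false := by simp [hx]
      have hA : erase_path (x :: rest) target = x :: erase_path rest target := by
        simp only [erase_path, erase_path.go, hne, Bool.false_eq_true, if_false]
        rw [erase_path_go_acc target rest ([] ++ [x])]
        simp
      rw [hA, ih]
      by_cases hmem : target ∈ rest
      · have hc : (x :: rest).contains target := by simp [hmem]
        have hc' : rest.contains target := by simp [hmem]
        obtain ⟨i, hi⟩ : ∃ i, PySem.List.index? rest target = some i := by
          have := (PySem.List.index?_isSome_iff (xs := rest) (v := target)).mpr hmem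
          exact Option.isSome_iff_exists.mp this
        have hi' : PySem.List.index? (x :: rest) target = some (i + 1) := by
          rw [PySem.List.index?_cons_of_ne rest hx, hi]; rfl
        simp only [erase_path_alt, hc, hc', if_true, hi, hi']
        rw [PySem.List.slice_to_natCast (xs := x :: rest) (b := i + 1),
            PySem.List.slice_to_natCast (xs := rest) (b := i)]
        simp [List.take_succ_cons]
      · have hc : (x :: rest).contains target = false := by simp [hmem, Ne.symm hx]
        have hc' : rest.contains target = false := by simp [hmem]
        simp [erase_path_alt, hmem, Ne.symm hx]

-- ===== VERDICT (by name: the statement is the Claim_ definition above) =====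
theorem erase_path_spec : Claim_equal_erase_path := by
  intro path target _
  exact erase_path_eq_alt path target
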